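-- pv_equiv track=rewrite | github.com/sky-bro/the-cryptopals-crypto-challenges | Set 2: Block crypto/Challenge 015: PKCS#7 padding validation/sol-02-15.py | has_valid_padding
-- ===== SOURCE A (Python) =====
-- def has_valid_padding(s):  # s in bytes
--     if not s:
--         return False
--     pad_len = s[-1]
--     if pad_len > len(s):
--         return False
--
--     for i in range(len(s) - pad_len, len(s)):
--         if s[i] != pad_len:
--             return False
--     return True
-- ===== SOURCE B (Python) =====
-- def has_valid_padding(s):  # s in bytes
--     if not s:
--         return False
--     pad_len = s[-1]
--     run = 0
--     for b in reversed(s):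
--         if b != pad_len:
--             break
--         run += 1
--     return run >= pad_len
-- ===== Notes on version B (the rewrite author's own statement) =====
-- stated objective: simpler
-- what changed: B replaces A's range-bound guard plus explicit index scan over range(len(s)-pad_len, len(s)) with a back-to-front count of the trailing run of copies of the last byte, returning run >= pad_len (the pad_len > len(s) guard disappears: the run can never exceed len(s)).
import Mathlib
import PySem

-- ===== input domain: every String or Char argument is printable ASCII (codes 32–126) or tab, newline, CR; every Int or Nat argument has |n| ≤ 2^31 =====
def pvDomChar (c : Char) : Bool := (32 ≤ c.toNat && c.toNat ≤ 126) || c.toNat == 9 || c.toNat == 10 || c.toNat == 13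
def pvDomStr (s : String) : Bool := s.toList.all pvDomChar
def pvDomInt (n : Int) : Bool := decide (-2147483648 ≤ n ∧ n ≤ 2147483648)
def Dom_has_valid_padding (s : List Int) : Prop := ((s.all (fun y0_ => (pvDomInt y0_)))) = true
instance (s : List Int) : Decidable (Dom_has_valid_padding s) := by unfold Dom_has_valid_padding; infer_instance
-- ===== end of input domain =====

-- B counts the trailing run of copies of the last byte instead of A's guarded index scan; objective: simpler.

-- ===== PORT A =====
-- the 'for i in range(len(s) - pad_len, len(s))' loop with its early 'return False'
def hvpLoop (s : List Int) (p : Int) : List Int → Bool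
  | [] => true
  | i :: rest =>
    match PySem.List.pyGet? s i with
    | none => false  -- IndexError (unreachable here: every generated index is in range)
    | some v => if v ≠ p then false else hvpLoop s p rest

def has_valid_padding (s : List Int) : Bool :=
  if s.isEmpty then false
  else
    match PySem.List.pyGet? s (-1) with
    | none => false  -- unreachable: s nonempty
    | some pad_len =>
      if pad_len > (s.length : Int) then false
      else hvpLoop s pad_len
        (PySem.List.pyRange ((s.length : Int) - pad_len) (s.length : Int) 1)

-- ===== PORT B =====
-- 'for b in reversed(s): if b != pad_len: break; run += 1' is the trailing run,
-- i.e. takeWhile on the reversed list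
def has_valid_padding_alt (s : List Int) : Bool :=
  if s.isEmpty then false
  else
    match PySem.List.pyGet? s (-1) with
    | none => false  -- unreachable: s nonempty
    | some pad_len =>
      let run := (s.reverse.takeWhile (fun b => b == pad_len)).length
      decide (pad_len ≤ (run : Int))

-- ===== PRECONDITION & SPEC =====
def Spec_has_valid_padding (s : List Int) (out : Bool) : Prop := out = has_valid_padding_alt s
instance (s : List Int) (out : Bool) : Decidable (Spec_has_valid_padding s out) := by unfold Spec_has_valid_padding; infer_instance

-- ===== CLAIM (what is proved, stated in full; the proofs are below) =====
def Claim_equal_has_valid_padding : Prop := ∀ (s : List Int), Dom_has_valid_padding s → Spec_has_valid_padding s (has_valid_padding s)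

-- ===== LEMMAS AND PROOFS =====

-- the A-loop succeeds iff every listed (in-range) index holds p
lemma hvpLoop_eq_all (s : List Int) (p : Int) (l : List Int)
    (hl : ∀ i ∈ l, 0 ≤ i ∧ i < (s.length : Int)) :
    hvpLoop s p l = (l.map (fun i => PySem.List.pyGetD s i 0)).all (fun v => v == p) := by
  induction l with
  | nil => rfl
  | cons i rest ih =>
    obtain ⟨h0, h1⟩ := hl i (by simp)
    have hg : PySem.List.pyGet? s i = some (PySem.List.pyGetD s i 0) := by
      rw [PySem.List.pyGet?_eq_some_getElem s h0 h1, PySem.List.pyGetD_eq_getElem s 0 h0 h1]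
    simp only [hvpLoop, hg, List.map_cons, List.all_cons]
    by_cases hv : PySem.List.pyGetD s i 0 = p
    · simp [hv, ih (fun j hj => hl j (by simp [hj]))]
    · simp [hv]

-- k ≤ length(takeWhile q l) iff the first k elements all satisfy q
lemma le_takeWhile_iff (q : Int → Bool) :
    ∀ (l : List Int) (k : Nat), k ≤ l.length →
      ((l.take k).all q = true ↔ k ≤ (l.takeWhile q).length) := by
  intro l
  induction l with
  | nil => intro k hk; simp at hk; subst hk; simp
  | cons a t ih =>
    intro k hk
    cases k with
    | zero => simp
    | succ k =>
      by_cases hq : q a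
      · simp only [List.takeWhile_cons, hq, if_true, List.take_succ_cons, List.all_cons,
          List.length_cons, Nat.succ_le_succ_iff]
        simp only [Bool.true_and]
        exact ih k (by simpa using hk)
      · simp [hq]

theorem has_valid_padding_spec : Claim_equal_has_valid_padding := by
  unfold Claim_equal_has_valid_padding Spec_has_valid_padding
  intro s _
  unfold has_valid_padding has_valid_padding_alt
  by_cases hs : s.isEmpty
  · simp [hs]
  simp only [hs, Bool.false_eq_true, if_false]
  cases hg : PySem.List.pyGet? s (-1) with
  | none => rfl
  | some p =>
    have hrun_le : (s.reverse.takeWhile (fun b => b == p)).length ≤ s.length := by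
      have := (List.takeWhile_prefix (l := s.reverse) (fun b => b == p)).length_le
      simpa using this
    by_cases hbig : p > (s.length : Int)
    · -- B: run ≤ len(s) < p, so p ≤ run is false
      have hnle : ¬ (p ≤ (((s.reverse.takeWhile (fun b => b == p)).length : Nat) : Int)) := by
        omega
      simp [hbig, hnle]
    · simp only [hbig, if_false]
      by_cases hpos : 0 < p
      · -- 1 ≤ p ≤ len(s)
        have h0 : (0:Int) ≤ (s.length : Int) - p := by omega
        have hall : ∀ i ∈ PySem.List.pyRange ((s.length : Int) - p) (s.length : Int) 1,
            0 ≤ i ∧ i < (s.length : Int) := by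
          intro i hi
          rw [PySem.List.mem_pyRange_one] at hi
          omega
        rw [hvpLoop_eq_all s p _ hall, PySem.List.map_pyGetD_pyRange' s 0 h0]
        have hdrop : (List.take p.toNat s.reverse).reverse
            = List.drop ((s.length : Int) - p).toNat s := by
          rw [List.reverse_take]
          simp only [List.reverse_reverse, List.length_reverse]
          congr 1
          omega
        rw [← hdrop, List.all_reverse, Bool.eq_iff_iff, decide_eq_true_iff,
          le_takeWhile_iff (fun b => b == p) s.reverse p.toNat (by simp; omega)]
        omega
      · -- p ≤ 0: the range is empty, A's loop returns True; and p ≤ 0 ≤ run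
        have hnil : PySem.List.pyRange ((s.length : Int) - p) (s.length : Int) 1 = [] :=
          PySem.List.pyRange_one_eq_nil (by omega)
        have hle : p ≤ (((s.reverse.takeWhile (fun b => b == p)).length : Nat) : Int) := by
          omega
        simp [hnil, hvpLoop, hle]

-- ===== VERDICT (by name: the statement is the Claim_ definition above) =====
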